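-- pv_equiv track=rewrite | github.com/ymtz13/CompetitiveProgramming | AtCoder/ABC346/F.py | solve
-- ===== SOURCE A (Python) =====
-- orda = ord("a")
--
-- def solve(N, S, T):
--     S = [ord(c) - orda for c in S]
--     T = [ord(c) - orda for c in T]
--
--     pos = [[] for _ in range(26)]
--     cnt = [[0] for _ in range(26)]
--     for i, c in enumerate(S):
--         pos[c].append(i)
--
--         for ccnt in cnt:
--             ccnt.append(ccnt[-1])
--
--         cnt[c][-1] += 1
--
--     def f(k):
--         n = i = 0
--         for t in T:
--             c = len(pos[t])
--             if c == 0: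
--                 return False
--
--             cL = cnt[t][i]
--             cR = c - cL
--
--             if k <= cR:
--                 inxt = pos[t][cL + k - 1] + 1
--             else:
--                 kk = k - cR  # > 0
--                 nnxt = n + 1 + (kk - 1) // c
--                 inxt = pos[t][(kk - 1) % c] + 1
--                 n = nnxt
--
--             i = inxt
--
--         return n < N or n == N and i == 0
--
--     ok = 0
--     ng = len(S) * N // len(T) + 1
--     while ng - ok > 1:
--         tgt = (ng + ok) // 2
--         if f(tgt):
--             ok = tgt
--         else:
--             ng = tgt
--
--     return ok
-- ===== SOURCE B (Python) =====
-- from bisect import bisect_left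
--
--
-- def solve(N, S, T):
--     L = len(S)
--     m = len(T)
--     pos = {}
--     for i, ch in enumerate(S):
--         pos.setdefault(ch, []).append(i)
--
--     R = T[::-1]
--
--     def ok(k):
--         # Feasibility of k checked BACKWARD: walk T from its last character to its
--         # first, maintaining b = exclusive upper bound on usable positions of S*N
--         # (viewed as positions of S repeated); each character run t^k must place its
--         # k occurrences below b, and the latest possible placement starts at the
--         # (count_before_b - k)-th occurrence of t, which becomes the new bound.
--         b = L * N
--         get = pos.get
--         bl = bisect_left
--         for ch in R:
--             occ = get(ch)
--             if not occ:
--                 return False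
--             c = len(occ)
--             e = (b // L) * c + bl(occ, b % L)  # occurrences of ch before b
--             if e < k:
--                 return False
--             e -= k
--             b = (e // c) * L + occ[e % c]
--         return True
--
--     hi = L * N // m + 1           # any feasible k is < hi
--     step = 1
--     while step < hi:
--         step *= 2
--     ans = 0                        # build the answer bit by bit (binary lifting)
--     while step:
--         if ans + step < hi and ok(ans + step):
--             ans += step
--         step //= 2
--     return ans
-- ===== Notes on version B (the rewrite author's own statement) =====
-- stated objective: alternative
-- what changed: B replaces A's bisection-plus-forward-greedy scheme entirely: feasibility of k is decided by walking T BACKWARD from the budget end (maintaining the latest admissible exclusive bound via occurrence-count arithmetic on per-character index lists, no 26xN prefix table), and the answer is built additively bit by bit by binary lifting instead of interval-halving bisection.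
-- outside the precondition, e.g. on solve(1, '`', 'z'): A returns 1, B returns 0; on solve(1, 'ab', 'z{'): A returns 0, B returns 0
import Mathlib
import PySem

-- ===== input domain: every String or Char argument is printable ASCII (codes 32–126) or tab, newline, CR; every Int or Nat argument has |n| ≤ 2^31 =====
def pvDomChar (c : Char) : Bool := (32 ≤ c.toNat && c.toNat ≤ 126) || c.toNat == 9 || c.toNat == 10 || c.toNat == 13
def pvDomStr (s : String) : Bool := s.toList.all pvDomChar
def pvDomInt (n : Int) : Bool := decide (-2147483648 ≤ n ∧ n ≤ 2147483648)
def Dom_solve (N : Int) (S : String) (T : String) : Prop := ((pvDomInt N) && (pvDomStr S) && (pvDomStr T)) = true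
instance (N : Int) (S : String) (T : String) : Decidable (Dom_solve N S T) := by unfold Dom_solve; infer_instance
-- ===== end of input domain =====

-- B replaces A's bisection + forward greedy walk by a backward feasibility walk over
-- reversed T (occurrence-count arithmetic from the budget end) and binary lifting.


-- ===== PORT A =====
def pvCode (c : Char) : Int := (c.toNat : Int) - 97   -- ord(c) - ord('a')

-- `xss[c] = f(xss[c])` with Python index semantics; on IndexError (never reached under
-- Pre_solve) Python raises, here: no-op
def pvModify (xss : List (List Int)) (c : Int) (f : List Int → List Int) : List (List Int) :=
  match PySem.List.pyIdx? xss.length c with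
  | some j => xss.set j (f (xss.getD j []))
  | none => xss

-- one iteration of A's build loop: `pos[c].append(i); for ccnt in cnt: ccnt.append(ccnt[-1]); cnt[c][-1] += 1`
def pvStepA (st : List (List Int) × List (List Int)) (ic : Int × Int) :
    List (List Int) × List (List Int) :=
  let pos := pvModify st.1 ic.2 (fun l => l ++ [ic.1])
  let cnt := st.2.map (fun l => l ++ [PySem.List.pyGetD l (-1) 0])
  (pos, pvModify cnt ic.2 (fun l => PySem.List.pySetD l (-1) (PySem.List.pyGetD l (-1) 0 + 1)))

def pvBuildA (Sc : List Int) : List (List Int) × List (List Int) :=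
  (PySem.List.enumerate Sc 0).foldl pvStepA
    (List.replicate 26 ([] : List Int), List.replicate 26 ([(0 : Int)]))

-- A's inner function f(k): walk T with state (n, i); early `return False` = the `false` branches
def pvFA (N : Int) (pos cnt : List (List Int)) (k : Int) :
    List Int → Int → Int → Bool
  | [], n, i => decide (n < N) || (decide (n = N) && decide (i = 0))
  | t :: ts, n, i =>
    let pt := PySem.List.pyGetD pos t []
    let c : Int := (pt.length : Int)
    if c = 0 then false
    else
      let cL := PySem.List.pyGetD (PySem.List.pyGetD cnt t []) i 0
      let cR := c - cL
      if k ≤ cR then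
        pvFA N pos cnt k ts n (PySem.List.pyGetD pt (cL + k - 1) 0 + 1)
      else
        let kk := k - cR
        pvFA N pos cnt k ts (n + 1 + PySem.Int.floordiv (kk - 1) c)
          (PySem.List.pyGetD pt (PySem.Int.mod (kk - 1) c) 0 + 1)

-- midpoint bounds, cited by the termination proof of A's while-loop
theorem pvMidLt (ok ng : Int) (h : 1 < ng - ok) :
    ok < PySem.Int.floordiv (ng + ok) 2 ∧ PySem.Int.floordiv (ng + ok) 2 < ng := by
  rw [PySem.Int.floordiv_eq_ediv_of_pos (by norm_num)]; omega

-- A's `while ng - ok > 1` bisection loop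
def pvLoopA (f : Int → Bool) (ok ng : Int) : Int :=
  if h : 1 < ng - ok then
    let tgt := PySem.Int.floordiv (ng + ok) 2
    if f tgt then pvLoopA f tgt ng else pvLoopA f ok tgt
  else ok
termination_by (ng - ok).toNat
decreasing_by
  · have := pvMidLt ok ng h; omega
  · have := pvMidLt ok ng h; omega

def solve (N : Int) (S : String) (T : String) : Int :=
  let Sc := S.toList.map pvCode
  let Tc := T.toList.map pvCode
  let st := pvBuildA Sc
  pvLoopA (fun k => pvFA N st.1 st.2 k Tc 0 0) 0
    (PySem.Int.floordiv ((Sc.length : Int) * N) ((Tc.length : Int)) + 1)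

-- ===== PORT B =====
-- `pos.setdefault(ch, []).append(idx)` over `enumerate(S)`
def pvBuildB (Sl : List Char) : PySem.Dict Char (List Int) :=
  (PySem.List.enumerate Sl 0).foldl
    (fun d p => d.modify p.2 [] (fun l => l ++ [p.1])) PySem.Dict.empty

-- B's ok(k): walk reversed(T) downward from the bound b, `bisect_left` is
-- PySem.List.bisectLeft; the early `return False`s are the `false` branches
def pvOKB (L : Int) (pos : PySem.Dict Char (List Int)) (k : Int) :
    List Char → Int → Bool
  | [], _ => true
  | ch :: rest, b =>
    match pos.get? ch with
    | none => false
    | some occ =>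
      if occ.length = 0 then false
      else
        let c : Int := (occ.length : Int)
        let e := PySem.Int.floordiv b L * c +
          (PySem.List.bisectLeft occ (PySem.Int.mod b L) : Int)
        if e < k then false
        else
          pvOKB L pos k rest
            (PySem.Int.floordiv (e - k) c * L + PySem.List.pyGetD occ (PySem.Int.mod (e - k) c) 0)

-- halving bound, cited by the termination proof of B's bit loop
theorem pvHalfLt (s : Int) (h : 1 ≤ s) :
    0 ≤ PySem.Int.floordiv s 2 ∧ PySem.Int.floordiv s 2 < s := by
  rw [PySem.Int.floordiv_eq_ediv_of_pos (by norm_num)]; omega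

-- B's `while step < hi: step *= 2` (the `1 ≤ s` conjunct only makes the recursion total;
-- the loop is always entered with s = 1)
def pvInitStep (hi s : Int) : Int :=
  if h : 1 ≤ s ∧ s < hi then pvInitStep hi (2 * s) else s
termination_by (hi - s).toNat
decreasing_by omega

-- B's `while step:` answer-building loop (step is always ≥ 0 here, so `step` truthy = 1 ≤ step)
def pvBitLoop (f : Int → Bool) (hi ans step : Int) : Int :=
  if h : 1 ≤ step then
    let c := ans + step
    if c < hi && f c then pvBitLoop f hi c (PySem.Int.floordiv step 2)
    else pvBitLoop f hi ans (PySem.Int.floordiv step 2)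
  else ans
termination_by step.toNat
decreasing_by
  · have := pvHalfLt step h; omega
  · have := pvHalfLt step h; omega

def solve_alt (N : Int) (S : String) (T : String) : Int :=
  let L := PySem.Str.len S
  let pos := pvBuildB S.toList
  let hi := PySem.Int.floordiv (L * N) (PySem.Str.len T) + 1
  pvBitLoop (fun k => pvOKB L pos k T.toList.reverse (L * N)) hi 0 (pvInitStep hi 1)

-- ===== PRECONDITION & SPEC =====
-- Pre_solve requires a lowercase S, a nonempty T, and T lowercase whenever the search
-- actually runs (len(S)*N ≥ len(T); otherwise both return 0 with T's characters untouched).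
-- Outside it A raises ZeroDivisionError (T = "") or IndexError (most characters outside
-- 'a'..'z'), except that characters 'G'..'`' are silently aliased to 'a'..'z' by negative-index
-- wraparound (an artefact of A's 26-slot arrays, e.g. solve(1,"`","z") = 1 where B gives 0),
-- and A's walk may stop at a character missing from S before reaching an out-of-range one.
def Pre_solve (N : Int) (S : String) (T : String) : Prop :=
  T ≠ "" ∧ S.toList.all (fun c => 97 ≤ c.toNat && c.toNat ≤ 122) = true ∧
    (T.toList.all (fun c => 97 ≤ c.toNat && c.toNat ≤ 122) = true ∨
      (S.toList.length : Int) * N < (T.toList.length : Int))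
instance (N : Int) (S : String) (T : String) : Decidable (Pre_solve N S T) := by
  unfold Pre_solve; infer_instance

def pvWitness_solve : Int × String × String := (2, "abcab", "ab")

def Spec_solve (N : Int) (S : String) (T : String) (out : Int) : Prop := out = solve_alt N S T
instance (N : Int) (S : String) (T : String) (out : Int) : Decidable (Spec_solve N S T out) := by
  unfold Spec_solve; infer_instance

-- ===== CLAIM (what is proved, stated in full; the proofs are below) =====
def Claim_equal_solve : Prop :=
  ∀ (N : Int) (S : String) (T : String), Dom_solve N S T → Pre_solve N S T →
    Spec_solve N S T (solve N S T)

-- ===== LEMMAS AND PROOFS =====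

-- ---------- occurrence-list library (shared characterisation of both builds) ----------

-- the list of indices at which x occurs
def pvOccs {α : Type} [BEq α] (l : List α) (x : α) : List Int :=
  ((PySem.List.enumerate l 0).filter (fun p => p.2 == x)).map (·.1)

-- A's prefix-count row for symbol t
def pvCntF (l : List Int) (t : Int) : List Int :=
  (List.range (l.length + 1)).map (fun i => (((l.take i).countP (· == t) : Nat) : Int))

theorem pvOccs_append_singleton {α : Type} [BEq α] (l : List α) (a x : α) :
    pvOccs (l ++ [a]) x = pvOccs l x ++ (if a == x then [(l.length : Int)] else []) := by
  unfold pvOccs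
  rw [PySem.List.enumerate_append]
  simp [List.filter_append]
  split
  · next h => simp [List.filter, h]
  · next h => simp at h; simp [List.filter, h]

theorem pvOccs_sorted {α : Type} [BEq α] (l : List α) (x : α) :
    (pvOccs l x).Pairwise (· < ·) := by
  unfold pvOccs
  rw [List.pairwise_map]
  exact (PySem.List.pairwise_lt_enumerate l 0).filter _

theorem pvOccs_mem {α : Type} [BEq α] (l : List α) (x : α) (e : Int) (he : e ∈ pvOccs l x) :
    0 ≤ e ∧ e < (l.length : Int) := by
  unfold pvOccs at he
  simp at he
  obtain ⟨b, hb, -⟩ := he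
  rw [PySem.List.mem_enumerate_iff] at hb
  obtain ⟨k, hk, hb⟩ := hb
  obtain ⟨h1, -⟩ := Prod.mk.injEq .. ▸ (by exact hb : (e, b) = _)
  subst h1; constructor <;> [positivity; simpa using hk]

theorem pvEnumerate_map {α β : Type} (f : α → β) (l : List α) (s : Int) :
    PySem.List.enumerate (l.map f) s = (PySem.List.enumerate l s).map (fun p => (p.1, f p.2)) := by
  induction l generalizing s with
  | nil => rfl
  | cons a t ih => simp [PySem.List.enumerate_cons, ih]

theorem pvCode_inj {a b : Char} (h : pvCode a = pvCode b) : a = b := by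
  have h2 : a.toNat = b.toNat := by unfold pvCode at h; omega
  have := congrArg Char.ofNat h2
  rwa [Char.ofNat_toNat, Char.ofNat_toNat] at this

theorem pvOccs_map_code (Sl : List Char) (ch : Char) :
    pvOccs (Sl.map pvCode) (pvCode ch) = pvOccs Sl ch := by
  unfold pvOccs
  rw [pvEnumerate_map, List.filter_map, List.map_map]
  congr 1
  apply List.filter_congr
  intro p _
  by_cases h : p.2 = ch
  · simp [h]
  · simp [h]
    exact fun hc => h (pvCode_inj hc)

theorem pvCountP_map_code (l : List Char) (ch : Char) :
    (l.map pvCode).countP (· == pvCode ch) = l.countP (· == ch) := by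
  rw [List.countP_map]
  apply List.countP_congr
  intro a _
  by_cases h : a = ch
  · simp [h, Function.comp]
  · simp only [Function.comp]
    simp [h]
    exact fun hc => h (pvCode_inj hc)

theorem pvOccs_not_mem {α : Type} [BEq α] [LawfulBEq α] (l : List α) (x : α) (h : x ∉ l) :
    pvOccs l x = [] := by
  unfold pvOccs
  rw [List.filter_eq_nil_iff.mpr, List.map_nil]
  intro p hp
  rw [PySem.List.mem_enumerate_iff] at hp
  obtain ⟨k, hk, rfl⟩ := hp
  intro hc
  rw [beq_iff_eq] at hc
  exact h (hc ▸ List.getElem_mem hk)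

theorem pvOccs_ne_nil {α : Type} [BEq α] [LawfulBEq α] (l : List α) (x : α) (h : x ∈ l) :
    pvOccs l x ≠ [] := by
  unfold pvOccs
  obtain ⟨k, hk, rfl⟩ := List.getElem_of_mem h
  have : ((0 + (k : Int)), l[k]) ∈ (PySem.List.enumerate l 0).filter (fun p => p.2 == l[k]) := by
    rw [List.mem_filter]
    refine ⟨(PySem.List.mem_enumerate_iff _ _ _).mpr ⟨k, hk, rfl⟩, by simp⟩
  intro hc
  rw [List.map_eq_nil_iff] at hc
  simp [hc] at this

theorem pvOccs_countP_lt {α : Type} [BEq α] (l : List α) (x : α) (r : Int) (hr : 0 ≤ r) :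
    (pvOccs l x).countP (fun e => decide (e < r)) = (l.take r.toNat).countP (· == x) := by
  induction l using List.reverseRecOn with
  | nil => simp [pvOccs]
  | append_singleton l a ih =>
    rw [pvOccs_append_singleton, List.countP_append]
    by_cases hc : r.toNat ≤ l.length
    · rw [List.take_append_of_le_length hc]
      have : ¬ ((l.length : Int) < r) := by omega
      split <;> simp [this, ih]
    · have h1 : ((l ++ [a]).take r.toNat) = l ++ [a] := List.take_of_length_le (by simp; omega)
      have h2 : (l.take r.toNat) = l := List.take_of_length_le (by omega)
      rw [h1, List.countP_append]
      have h3 : ((l.length : Int) < r) := by omega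
      rw [ih, h2]
      split <;> next h => simp [h3, h]

theorem pvBisect_eq_countP (xs : List Int) (v : Int) (hs : xs.Pairwise (· < ·)) :
    PySem.List.bisectLeft xs v = xs.countP (fun e => decide (e < v)) := by
  obtain ⟨hlen, hlt, hge⟩ := PySem.List.bisectLeft_spec xs v (hs.imp le_of_lt)
  set b := PySem.List.bisectLeft xs v with hb
  conv_rhs => rw [← List.take_append_drop b xs]
  rw [List.countP_append]
  have h1 : (xs.take b).countP (fun e => decide (e < v)) = b := by
    rw [List.countP_eq_length.mpr, List.length_take_of_le hlen]
    intro e he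
    obtain ⟨j, hj, rfl⟩ := List.mem_take_iff_getElem.mp he
    simpa using hlt j (by omega) (by omega)
  have h2 : (xs.drop b).countP (fun e => decide (e < v)) = 0 := by
    rw [List.countP_eq_zero]
    intro e he
    obtain ⟨j, hj, rfl⟩ := List.mem_drop_iff_getElem.mp he
    simpa using hge (b + j) (by omega) (by omega)
  omega

theorem pvSetD_neg_one_append {α : Type} (xs : List α) (x v : α) :
    PySem.List.pySetD (xs ++ [x]) (-1) v = xs ++ [v] := by
  simp [PySem.List.pySetD, PySem.List.pySet?, PySem.List.pyIdx?]

theorem pvModify_length (xss : List (List Int)) (c : Int) (f : List Int → List Int) :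
    (pvModify xss c f).length = xss.length := by
  unfold pvModify
  cases h : PySem.List.pyIdx? xss.length c <;> simp

theorem pvIdx?_nonneg (n : Nat) (i : Int) (h0 : 0 ≤ i) (h : i < (n : Int)) :
    PySem.List.pyIdx? n i = some i.toNat := by
  simp [PySem.List.pyIdx?, h0, h]

theorem pvModify_getD (xss : List (List Int)) (c t : Int) (f : List Int → List Int)
    (hc0 : 0 ≤ c) (hc : c < (xss.length : Int)) (ht0 : 0 ≤ t) (ht : t < (xss.length : Int)) :
    PySem.List.pyGetD (pvModify xss c f) t [] =
      if t = c then f (PySem.List.pyGetD xss c []) else PySem.List.pyGetD xss t [] := by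
  unfold pvModify
  rw [pvIdx?_nonneg _ _ hc0 hc]
  have hcn : c.toNat < xss.length := by omega
  have htn : t.toNat < xss.length := by omega
  by_cases h : t = c
  · subst h
    rw [PySem.List.pyGetD_eq_getElem _ _ hc0 (by simpa using hc), if_pos rfl]
    rw [List.getElem_set_self (by simpa using hcn)]
    rw [List.getD_eq_getElem _ _ hcn, PySem.List.pyGetD_eq_getElem _ _ hc0 hc]
  · rw [PySem.List.pyGetD_eq_getElem _ _ ht0 (by simpa using ht), if_neg h]
    rw [List.getElem_set_ne (by omega) (by simpa using htn)]
    rw [PySem.List.pyGetD_eq_getElem _ _ ht0 ht]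

theorem pvCntF_eq_append (l : List Int) (t : Int) :
    pvCntF l t = (List.range l.length).map
        (fun i => (((l.take i).countP (· == t) : Nat) : Int)) ++
      [((l.countP (· == t) : Nat) : Int)] := by
  unfold pvCntF
  rw [List.range_succ, List.map_append]
  simp

theorem pvBuildA_append (l : List Int) (a : Int) :
    pvBuildA (l ++ [a]) = pvStepA (pvBuildA l) ((l.length : Int), a) := by
  unfold pvBuildA
  rw [PySem.List.enumerate_append, List.foldl_append]
  simp [PySem.List.enumerate]

theorem pvBuildA_inv (l : List Int) (hl : ∀ c ∈ l, 0 ≤ c ∧ c < 26) :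
    (pvBuildA l).1.length = 26 ∧ (pvBuildA l).2.length = 26 ∧
      ∀ t : Int, 0 ≤ t → t < 26 →
        PySem.List.pyGetD (pvBuildA l).1 t [] = pvOccs l t ∧
        PySem.List.pyGetD (pvBuildA l).2 t [] = pvCntF l t := by
  induction l using List.reverseRecOn with
  | nil =>
    refine ⟨by simp [pvBuildA, PySem.List.enumerate],
      by simp [pvBuildA, PySem.List.enumerate], ?_⟩
    intro t ht0 ht
    constructor
    · rw [show (pvBuildA []).1 = List.replicate 26 [] from rfl,
         PySem.List.pyGetD_eq_getElem _ _ ht0 (by simp; omega),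
         List.getElem_replicate]
      rfl
    · rw [show (pvBuildA []).2 = List.replicate 26 [(0:Int)] from rfl,
         PySem.List.pyGetD_eq_getElem _ _ ht0 (by simp; omega),
         List.getElem_replicate]
      simp [pvCntF]
  | append_singleton l a ih =>
    have hmem : ∀ c ∈ l, 0 ≤ c ∧ c < 26 := fun c hc => hl c (List.mem_append_left _ hc)
    have ha : 0 ≤ a ∧ a < 26 := hl a (by simp)
    obtain ⟨h1, h2, h3⟩ := ih hmem
    rw [pvBuildA_append]
    unfold pvStepA
    refine ⟨by simp [pvModify_length, h1], by simp [pvModify_length, h2], ?_⟩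
    intro t ht0 ht
    have hgl : ∀ t : Int, 0 ≤ t → t < 26 →
        PySem.List.pyGetD ((pvBuildA l).2.map (fun s => s ++ [PySem.List.pyGetD s (-1) 0])) t [] =
          pvCntF l t ++ [((l.countP (· == t) : Nat) : Int)] := by
      intro t ht0 ht
      rw [PySem.List.pyGetD_eq_getElem _ _ ht0 (by simp [h2]; omega)]
      rw [List.getElem_map]
      have := (h3 t ht0 ht).2
      rw [PySem.List.pyGetD_eq_getElem _ _ ht0 (by simp [h2]; omega)] at this
      rw [this]
      congr 1
      rw [pvCntF_eq_append, PySem.List.pyGetD_neg_one_append_singleton]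
    constructor
    · rw [pvModify_getD _ _ _ _ ha.1 (by omega) ht0 (by omega)]
      rw [pvOccs_append_singleton, (h3 t ht0 ht).1]
      by_cases h : t = a
      · subst h; simp [(h3 t ht0 ht).1]
      · have : (a == t) = false := by simpa using fun hc => h hc.symm
        simp [h, this]
    · rw [pvModify_getD _ _ _ _ ha.1 (by simp [h2]; omega) ht0 (by simp [h2]; omega)]
      have hsplit : ∀ u : Int, pvCntF (l ++ [a]) u =
          pvCntF l u ++ [(((l ++ [a]).countP (· == u) : Nat) : Int)] := by
        intro u
        unfold pvCntF
        rw [show (l ++ [a]).length + 1 = (l.length + 1) + 1 by simp, List.range_succ,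
          List.map_append]
        congr 1
        · apply List.map_congr_left
          intro i hi
          rw [List.mem_range] at hi
          rw [List.take_append_of_le_length (by omega)]
        · simp [List.take_of_length_le (by simp : (l ++ [a]).length ≤ l.length + 1)]
      by_cases h : t = a
      · subst h
        rw [if_pos rfl, hgl t ht0 ht, pvSetD_neg_one_append,
          PySem.List.pyGetD_neg_one_append_singleton, hsplit t]
        congr 2
        rw [List.countP_append]
        simp
      · rw [if_neg h, hgl t ht0 ht, hsplit t]
        congr 2
        rw [List.countP_append]
        have : (a == t) = false := by simpa using fun hc => h (hc.symm)
        simp [this]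

theorem pvBuildB_append (l : List Char) (a : Char) :
    pvBuildB (l ++ [a]) = (pvBuildB l).modify a [] (· ++ [(l.length : Int)]) := by
  unfold pvBuildB
  rw [PySem.List.enumerate_append, List.foldl_append]
  simp [PySem.List.enumerate]

theorem pvBuildB_getD (Sl : List Char) (ch : Char) :
    (pvBuildB Sl).getD ch [] = pvOccs Sl ch := by
  induction Sl using List.reverseRecOn with
  | nil => rfl
  | append_singleton l a ih =>
    rw [pvBuildB_append, pvOccs_append_singleton]
    by_cases h : ch = a
    · subst h; rw [PySem.Dict.getD_modify_self, ih]; simp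
    · rw [PySem.Dict.getD_modify_of_ne _ _ _ h, ih]
      have : (a == ch) = false := by simpa using fun hc => h hc.symm
      simp [this]

theorem pvBuildB_get?_none (Sl : List Char) (ch : Char) :
    (pvBuildB Sl).get? ch = none ↔ ch ∉ Sl := by
  rw [PySem.Dict.get?_eq_none_iff_contains]
  have : ∀ l : List Char, (pvBuildB l).contains ch = decide (ch ∈ l) := by
    intro l
    induction l using List.reverseRecOn with
    | nil => simp [pvBuildB, PySem.List.enumerate]
    | append_singleton l a ih =>
      rw [pvBuildB_append, PySem.Dict.contains_modify, ih]
      by_cases h : ch = a <;> simp [h]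
  rw [this]; simp

theorem pvBuildB_get? (Sl : List Char) (ch : Char) (occ : List Int)
    (h : (pvBuildB Sl).get? ch = some occ) : occ = pvOccs Sl ch := by
  have := pvBuildB_getD Sl ch
  simp [PySem.Dict.getD, h] at this
  exact this.symm ▸ rfl

theorem pvBuildB_get?_some (Sl : List Char) (ch : Char) (h : ch ∈ Sl) :
    (pvBuildB Sl).get? ch = some (pvOccs Sl ch) := by
  cases hg : (pvBuildB Sl).get? ch with
  | none => exact absurd ((pvBuildB_get?_none _ _).mp hg) (by simpa using h)
  | some occ => rw [pvBuildB_get? _ _ _ hg]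

-- ---------- division algebra ----------

theorem pvQR (q c s : Int) (h0 : 0 ≤ s) (h1 : s < c) :
    PySem.Int.floordiv (q * c + s) c = q ∧ PySem.Int.mod (q * c + s) c = s := by
  have hc : 0 < c := by omega
  have hd : PySem.Int.floordiv (q * c + s) c = q := by
    rw [PySem.Int.floordiv_eq_iff_of_pos hc]
    constructor <;> nlinarith
  refine ⟨hd, ?_⟩
  have := PySem.Int.floordiv_mul_add_mod (q * c + s) c
  rw [hd] at this
  omega

theorem pvShift (q c x : Int) (hc : 0 < c) :
    PySem.Int.floordiv (q * c + x) c = q + PySem.Int.floordiv x c ∧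
      PySem.Int.mod (q * c + x) c = PySem.Int.mod x c := by
  have hm0 := PySem.Int.mod_nonneg x hc
  have hm1 := PySem.Int.mod_lt x hc
  have he := PySem.Int.floordiv_mul_add_mod x c
  have : q * c + x = (q + PySem.Int.floordiv x c) * c + PySem.Int.mod x c := by ring_nf; nlinarith
  rw [this]
  exact pvQR _ _ _ hm0 hm1

theorem pvFdiv_nonneg (a b : Int) (ha : 0 ≤ a) (hb : 0 < b) :
    0 ≤ PySem.Int.floordiv a b := by
  rw [PySem.Int.floordiv_eq_ediv_of_pos hb]
  exact Int.ediv_nonneg ha (by omega)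

theorem pvFdiv_mono (a a' b : Int) (h : a ≤ a') (hb : 0 < b) :
    PySem.Int.floordiv a b ≤ PySem.Int.floordiv a' b := by
  rw [PySem.Int.floordiv_eq_ediv_of_pos hb, PySem.Int.floordiv_eq_ediv_of_pos hb]
  exact Int.ediv_le_ediv hb h

-- ---------- the mathematical backward/forward machinery ----------

-- index of the e-th occurrence (0-based) in S repeated forever
def pvIdx (L : Int) (occ : List Int) (e : Int) : Int :=
  PySem.Int.floordiv e (occ.length : Int) * L +
    PySem.List.pyGetD occ (PySem.Int.mod e (occ.length : Int)) 0

-- number of occurrences at positions < b in S repeated forever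
def pvCntB (L : Int) (occ : List Int) (b : Int) : Int :=
  PySem.Int.floordiv b L * (occ.length : Int) +
    ((occ.countP (fun x => decide (x < PySem.Int.mod b L))) : Int)

-- well-formed occurrence list
def pvGood (L : Int) (occ : List Int) : Prop :=
  occ.Pairwise (· < ·) ∧ (∀ x ∈ occ, 0 ≤ x ∧ x < L) ∧ occ ≠ [] ∧ 1 ≤ L

theorem pvRankNat (occ : List Int) (hs : occ.Pairwise (· < ·)) (r : Int) :
    ∀ (s : Nat) (hlt : s < occ.length),
      occ[s] < r ↔ (s : Int) < ((occ.countP (fun x => decide (x < r))) : Nat) := by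
  induction occ with
  | nil => intro s hlt; simp at hlt
  | cons h tl ih =>
    intro s hlt
    have htl : ∀ x ∈ tl, h < x := by
      intro x hx; exact (List.pairwise_cons.mp hs).1 x hx
    cases s with
    | zero =>
      rw [List.getElem_cons_zero, List.countP_cons]
      by_cases hr : h < r
      · simp [hr]
      · have hz : tl.countP (fun x => decide (x < r)) = 0 := by
          rw [List.countP_eq_zero]
          intro x hx
          have := htl x hx
          simp; omega
        simp [hr, hz]
    | succ s =>
      have hlt' : s < tl.length := by simpa using hlt
      have ihs := ih (List.pairwise_cons.mp hs).2 s hlt'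
      have hcc : (h :: tl).countP (fun x => decide (x < r)) =
          tl.countP (fun x => decide (x < r)) + (if h < r then 1 else 0) := by
        rw [List.countP_cons]; by_cases hh : h < r <;> simp [hh]
      rw [List.getElem_cons_succ, hcc]
      by_cases hh : h < r
      · rw [if_pos hh, ihs]
        push_cast
        omega
      · have hz : tl.countP (fun x => decide (x < r)) = 0 := by
          rw [List.countP_eq_zero]
          intro x hx
          have := htl x hx
          simp; omega
        have hsx : ¬ (tl[s] < r) := by
          have := htl tl[s] (List.getElem_mem hlt')
          omega
        rw [if_neg hh, hz]
        push_cast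
        constructor
        · intro hc; exact absurd hc hsx
        · intro hc; omega

theorem pvKey (L : Int) (occ : List Int) (hg : pvGood L occ) (e b : Int) (he : 0 ≤ e) :
    pvIdx L occ e < b ↔ e < pvCntB L occ b := by
  obtain ⟨hs, hbd, hne, hL⟩ := hg
  have hcpos : (0:Int) < (occ.length : Int) := by
    have := List.length_pos_iff.mpr hne; exact_mod_cast this
  set c : Int := (occ.length : Int) with hc
  have hq0 := pvFdiv_nonneg e c he hcpos
  have hqe := PySem.Int.floordiv_mul_add_mod e c
  have hs0 := PySem.Int.mod_nonneg e hcpos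
  have hs1 := PySem.Int.mod_lt e hcpos
  have hu := PySem.Int.floordiv_mul_add_mod b L
  have hr0 := PySem.Int.mod_nonneg b (show (0:Int) < L by omega)
  have hr1 := PySem.Int.mod_lt b (show (0:Int) < L by omega)
  unfold pvIdx pvCntB
  rw [← hc]
  set q := PySem.Int.floordiv e c
  set s := PySem.Int.mod e c
  set u := PySem.Int.floordiv b L
  set r := PySem.Int.mod b L
  have hmemo : PySem.List.pyGetD occ s 0 ∈ occ :=
    PySem.List.pyGetD_mem occ 0 (by constructor <;> omega)
  have hosv := hbd _ hmemo
  set osv := PySem.List.pyGetD occ s 0 with hosvdef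
  have hrank : osv < r ↔ s < ((occ.countP (fun x => decide (x < r))) : Nat) := by
    have h1 := pvRankNat occ hs r s.toNat (by omega)
    rw [PySem.List.pyGetD_eq_getElem _ _ hs0 hs1] at hosvdef
    rw [hosvdef, h1]
    omega
  have hrkc : (occ.countP (fun x => decide (x < r))) ≤ occ.length :=
    List.countP_le_length
  set rk : Int := (((occ.countP (fun x => decide (x < r))) : Nat) : Int) with hrkdef
  have hrk0 : 0 ≤ rk := by positivity
  have hrkc' : rk ≤ c := by rw [hrkdef, hc]; exact_mod_cast hrkc
  rcases lt_trichotomy q u with hqu | hqu | hqu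
  · have g1 : q * L + osv < b := by
      nlinarith [mul_le_mul_of_nonneg_right (show q + 1 ≤ u by omega) (show (0:Int) ≤ L by omega)]
    have g2 : e < u * c + rk := by
      nlinarith [mul_le_mul_of_nonneg_right (show q + 1 ≤ u by omega) (show (0:Int) ≤ c by omega)]
    simp [g1, g2]
  · have hql : q * L = u * L := by rw [hqu]
    have hqc : q * c = u * c := by rw [hqu]
    constructor
    · intro hlt
      have h5 : osv < r := by linarith
      have h6 := hrank.mp h5
      linarith
    · intro hlt
      have h5 : s < rk := by linarith
      have h6 := hrank.mpr h5
      linarith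
  · have g1 : ¬ (q * L + osv < b) := by
      nlinarith [mul_le_mul_of_nonneg_right (show u + 1 ≤ q by omega) (show (0:Int) ≤ L by omega)]
    have g2 : ¬ (e < u * c + rk) := by
      nlinarith [mul_le_mul_of_nonneg_right (show u + 1 ≤ q by omega) (show (0:Int) ≤ c by omega)]
    simp [g1, g2]

theorem pvCnt_nonneg (L : Int) (occ : List Int) (hg : pvGood L occ) (p : Int) (hp : 0 ≤ p) :
    0 ≤ pvCntB L occ p := by
  obtain ⟨hs, hbd, hne, hL⟩ := hg
  have h1 := pvFdiv_nonneg p L hp (by omega)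
  unfold pvCntB
  have h2 : 0 ≤ PySem.Int.floordiv p L * (occ.length : Int) := mul_nonneg h1 (by positivity)
  have h3 : (0:Int) ≤ ((occ.countP (fun x => decide (x < PySem.Int.mod p L))) : Nat) := by
    positivity
  exact add_nonneg h2 h3

theorem pvIdx_nonneg (L : Int) (occ : List Int) (hg : pvGood L occ) (e : Int) (he : 0 ≤ e) :
    0 ≤ pvIdx L occ e := by
  obtain ⟨hs, hbd, hne, hL⟩ := hg
  have hcpos : (0:Int) < (occ.length : Int) := by
    have := List.length_pos_iff.mpr hne; exact_mod_cast this
  have h1 := pvFdiv_nonneg e _ he hcpos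
  have hs0 := PySem.Int.mod_nonneg e hcpos
  have hs1 := PySem.Int.mod_lt e hcpos
  have hmemo : PySem.List.pyGetD occ (PySem.Int.mod e (occ.length : Int)) 0 ∈ occ :=
    PySem.List.pyGetD_mem occ 0 (by constructor <;> omega)
  have := (hbd _ hmemo).1
  unfold pvIdx
  nlinarith

theorem pvIdx_mono (L : Int) (occ : List Int) (hg : pvGood L occ) (e1 e2 : Int)
    (h0 : 0 ≤ e1) (h12 : e1 ≤ e2) : pvIdx L occ e1 + (e2 - e1) ≤ pvIdx L occ e2 := by
  obtain ⟨hs, hbd, hne, hL⟩ := hg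
  have hcpos : (0:Int) < (occ.length : Int) := by
    have := List.length_pos_iff.mpr hne; exact_mod_cast this
  set c : Int := (occ.length : Int) with hc
  -- single-step version
  have hstep : ∀ e : Int, 0 ≤ e → pvIdx L occ e + 1 ≤ pvIdx L occ (e + 1) := by
    intro e he
    have hqe := PySem.Int.floordiv_mul_add_mod e c
    have hs0 := PySem.Int.mod_nonneg e hcpos
    have hs1 := PySem.Int.mod_lt e hcpos
    set q := PySem.Int.floordiv e c with hq
    set s := PySem.Int.mod e c with hsv
    have hmm : ∀ j : Int, 0 ≤ j → j < c → PySem.List.pyGetD occ j 0 ∈ occ := by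
      intro j hj0 hj1
      exact PySem.List.pyGetD_mem occ 0 (by constructor <;> omega)
    by_cases hlast : s + 1 < c
    · have hqr := pvQR q c (s + 1) (by omega) hlast
      have he1 : e + 1 = q * c + (s + 1) := by omega
      unfold pvIdx
      rw [he1, hqr.1, hqr.2, ← hq, ← hsv]
      have hlt : PySem.List.pyGetD occ s 0 < PySem.List.pyGetD occ (s + 1) 0 := by
        rw [PySem.List.pyGetD_eq_getElem _ _ hs0 hs1,
          PySem.List.pyGetD_eq_getElem _ _ (by omega) (by omega : s + 1 < c)]
        have := List.pairwise_iff_getElem.mp hs s.toNat (s + 1).toNat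
          (by omega) (by omega) (by omega)
        exact this
      omega
    · have hse : s = c - 1 := by omega
      have he1 : e + 1 = (q + 1) * c + 0 := by rw [hse] at hqe; ring_nf; omega
      have hqr := pvQR (q + 1) c 0 le_rfl (by omega)
      unfold pvIdx
      rw [he1, hqr.1, hqr.2, ← hq, ← hsv]
      have h1 := hbd _ (hmm s hs0 hs1)
      have h2 := hbd _ (hmm 0 le_rfl (by omega))
      nlinarith
  -- iterate
  have key : ∀ (d : Nat) (e : Int), 0 ≤ e →
      pvIdx L occ e + (d : Int) ≤ pvIdx L occ (e + (d : Int)) := by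
    intro d
    induction d with
    | zero => intro e he; simp
    | succ d ih =>
      intro e he
      have h1 := ih e he
      have h2 := hstep (e + (d : Int)) (by omega)
      push_cast
      have : e + ((d : Int) + 1) = (e + (d : Int)) + 1 := by ring
      rw [this]
      omega
  have hd : e2 = e1 + ((e2 - e1).toNat : Int) := by omega
  have := key (e2 - e1).toNat e1 h0
  rw [← hd] at this
  omega

theorem pvCnt_mono (L : Int) (occ : List Int) (hg : pvGood L occ) (b b' : Int) (h : b ≤ b') :
    pvCntB L occ b ≤ pvCntB L occ b' := by
  obtain ⟨hs, hbd, hne, hL⟩ := hg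
  have hcpos : (0:Int) < (occ.length : Int) := by
    have := List.length_pos_iff.mpr hne; exact_mod_cast this
  have hub := PySem.Int.floordiv_mul_add_mod b L
  have hub' := PySem.Int.floordiv_mul_add_mod b' L
  have hr0 := PySem.Int.mod_nonneg b (show (0:Int) < L by omega)
  have hr1 := PySem.Int.mod_lt b (show (0:Int) < L by omega)
  have hr0' := PySem.Int.mod_nonneg b' (show (0:Int) < L by omega)
  have hr1' := PySem.Int.mod_lt b' (show (0:Int) < L by omega)
  have huu : PySem.Int.floordiv b L ≤ PySem.Int.floordiv b' L :=
    pvFdiv_mono b b' L h (by omega)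
  unfold pvCntB
  rcases eq_or_lt_of_le huu with hqu | hqu
  · rw [← hqu]
    have hrr : PySem.Int.mod b L ≤ PySem.Int.mod b' L := by nlinarith
    have hcc : occ.countP (fun y => decide (y < PySem.Int.mod b L)) ≤
        occ.countP (fun y => decide (y < PySem.Int.mod b' L)) := by
      apply List.countP_mono_left
      intro a _
      simp only [decide_eq_true_eq]
      omega
    have hcc' : ((occ.countP (fun y => decide (y < PySem.Int.mod b L))) : Int) ≤
        ((occ.countP (fun y => decide (y < PySem.Int.mod b' L))) : Int) := by exact_mod_cast hcc
    omega
  · have h3 : ((occ.countP (fun y => decide (y < PySem.Int.mod b L))) : Int) ≤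
        (occ.length : Int) := by exact_mod_cast List.countP_le_length
    have h4 : (0:Int) ≤ ((occ.countP (fun y => decide (y < PySem.Int.mod b' L))) : Nat) := by
      positivity
    nlinarith

theorem pvCnt_state (L : Int) (occ : List Int) (hg : pvGood L occ) (n i : Int)
    (h0 : 0 ≤ i) (h1 : i ≤ L) :
    pvCntB L occ (n * L + i) = n * (occ.length : Int) +
      ((occ.countP (fun x => decide (x < i))) : Nat) := by
  obtain ⟨hs, hbd, hne, hL⟩ := hg
  by_cases hi : i < L
  · have hqr := pvQR n L i h0 hi
    unfold pvCntB
    rw [hqr.1, hqr.2]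
  · have hiL : i = L := by omega
    have he : n * L + i = (n + 1) * L + 0 := by rw [hiL]; ring
    have hqr := pvQR (n + 1) L 0 le_rfl (by omega)
    unfold pvCntB
    rw [he, hqr.1, hqr.2]
    have hall : occ.countP (fun x => decide (x < i)) = occ.length := by
      rw [List.countP_eq_length]
      intro x hx
      have := (hbd x hx).2
      simp; omega
    have hzero : occ.countP (fun x => decide (x < (0:Int))) = 0 := by
      rw [List.countP_eq_zero]
      intro x hx
      have := (hbd x hx).1
      simp; omega
    rw [hall, hzero]
    push_cast
    ring

-- the Galois adjunction between the forward greedy step and the backward step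
theorem pvAdj (L : Int) (occ : List Int) (hg : pvGood L occ) (k p b : Int)
    (hk : 1 ≤ k) (hp : 0 ≤ p) :
    pvIdx L occ (pvCntB L occ p + k - 1) + 1 ≤ b ↔
      (k ≤ pvCntB L occ b ∧ p ≤ pvIdx L occ (pvCntB L occ b - k)) := by
  have hcp := pvCnt_nonneg L occ hg p hp
  constructor
  · intro hle
    have h1 : pvIdx L occ (pvCntB L occ p + k - 1) < b := by omega
    have h2 := (pvKey L occ hg (pvCntB L occ p + k - 1) b (by omega)).mp h1
    have hkb : k ≤ pvCntB L occ b := by omega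
    refine ⟨hkb, ?_⟩
    by_contra hcon
    push_neg at hcon
    have h3 := (pvKey L occ hg (pvCntB L occ b - k) p (by omega)).mp hcon
    omega
  · rintro ⟨hkb, hgeo⟩
    have h3 : ¬ (pvIdx L occ (pvCntB L occ b - k) < p) := by omega
    have h4 : ¬ (pvCntB L occ b - k < pvCntB L occ p) := fun hc =>
      h3 ((pvKey L occ hg (pvCntB L occ b - k) p (by omega)).mpr hc)
    have h5 : pvCntB L occ p + k - 1 < pvCntB L occ b := by omega
    have := (pvKey L occ hg (pvCntB L occ p + k - 1) b (by omega)).mpr h5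
    omega

-- option-valued mirror of pvOKB, carrying the backward bound
def pvBwd (L : Int) (pos : PySem.Dict Char (List Int)) (k : Int) :
    List Char → Int → Option Int
  | [], b => some b
  | ch :: rest, b =>
    match pos.get? ch with
    | none => none
    | some occ =>
      if occ.length = 0 then none
      else if pvCntB L occ b < k then none
      else pvBwd L pos k rest (pvIdx L occ (pvCntB L occ b - k))

theorem pvOKB_eq (L : Int) (Sl : List Char) (k : Int) :
    ∀ (xs : List Char) (b : Int),
      pvOKB L (pvBuildB Sl) k xs b = (pvBwd L (pvBuildB Sl) k xs b).isSome := by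
  intro xs
  induction xs with
  | nil => intro b; rfl
  | cons ch rest ih =>
    intro b
    simp only [pvOKB, pvBwd]
    rcases hgg : (pvBuildB Sl).get? ch with _ | occ
    · rfl
    · have hocc := pvBuildB_get? _ _ _ hgg
      have hsorted : occ.Pairwise (· < ·) := by rw [hocc]; exact pvOccs_sorted Sl ch
      by_cases h1 : occ.length = 0
      · simp [h1]
      · dsimp only
        rw [if_neg h1, if_neg h1]
        have he : PySem.Int.floordiv b L * (occ.length : Int) +
            ((PySem.List.bisectLeft occ (PySem.Int.mod b L) : Nat) : Int) = pvCntB L occ b := by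
          rw [pvBisect_eq_countP occ _ hsorted]; rfl
        rw [he]
        by_cases h2 : pvCntB L occ b < k
        · simp [h2]
        · rw [if_neg h2, if_neg h2, ih]
          rfl

theorem pvBwd_append (L : Int) (pos : PySem.Dict Char (List Int)) (k : Int)
    (xs : List Char) (t : Char) (b : Int) :
    pvBwd L pos k (xs ++ [t]) b = (pvBwd L pos k xs b).bind (pvBwd L pos k [t]) := by
  induction xs generalizing b with
  | nil => simp [pvBwd]
  | cons x xs ih =>
    simp only [List.cons_append, pvBwd]
    rcases hgg : pos.get? x with _ | occ
    · rfl
    · by_cases h1 : occ.length = 0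
      · simp [h1]
      · by_cases h2 : pvCntB L occ b < k
        · simp [h1, h2]
        · simp only [h1, h2, ih, if_false, if_neg]
          rfl

-- every completed backward walk lies below b - k·|xs| and (if nonempty) above 0
theorem pvBwd_le (Sl : List Char) (k : Int) (hk : 1 ≤ k) (hL : 1 ≤ (Sl.length : Int)) :
    ∀ (xs : List Char) (b v : Int),
      pvBwd (Sl.length : Int) (pvBuildB Sl) k xs b = some v →
        v ≤ b - k * (xs.length : Int) ∧ (xs ≠ [] → 0 ≤ v) := by
  intro xs
  induction xs with
  | nil =>
    intro b v h
    simp only [pvBwd, Option.some.injEq] at h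
    subst h
    simp
  | cons ch rest ih =>
    intro b v h
    simp only [pvBwd] at h
    rcases hgg : (pvBuildB Sl).get? ch with _ | occ
    · rw [hgg] at h; simp [pvBwd] at h
    · rw [hgg] at h
      dsimp only at h
      by_cases h1 : occ.length = 0
      · simp [h1] at h
      · rw [if_neg h1] at h
        by_cases h2 : pvCntB (Sl.length : Int) occ b < k
        · simp [h2] at h
        · rw [if_neg h2] at h
          have hocc := pvBuildB_get? _ _ _ hgg
          have hgood : pvGood (Sl.length : Int) occ := by
            refine ⟨by rw [hocc]; exact pvOccs_sorted Sl ch, ?_, by simpa using h1, hL⟩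
            intro x hx
            rw [hocc] at hx
            exact pvOccs_mem Sl ch x hx
          have hk2 : 0 ≤ pvCntB (Sl.length : Int) occ b - k := by omega
          have hb1n : 0 ≤ pvIdx (Sl.length : Int) occ (pvCntB (Sl.length : Int) occ b - k) :=
            pvIdx_nonneg _ _ hgood _ hk2
          have hb1le : pvIdx (Sl.length : Int) occ (pvCntB (Sl.length : Int) occ b - k) ≤
              b - k := by
            have hm := pvIdx_mono _ _ hgood (pvCntB (Sl.length : Int) occ b - k)
              (pvCntB (Sl.length : Int) occ b - 1) hk2 (by omega)
            have hlt := (pvKey _ _ hgood (pvCntB (Sl.length : Int) occ b - 1) b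
              (by omega)).mpr (by omega)
            omega
          obtain ⟨ha, hb⟩ := ih _ _ h
          constructor
          · have hlen : ((ch :: rest).length : Int) = (rest.length : Int) + 1 := by
              simp
            rw [hlen]
            nlinarith
          · intro _
            rcases List.eq_nil_or_concat rest with hrest | hrest
            · subst hrest
              simp only [pvBwd, Option.some.injEq] at h
              omega
            · apply hb
              obtain ⟨l, a, rfl⟩ := hrest
              simp

-- the backward walk is antitone in k and monotone in the bound
theorem pvBwd_mono (Sl : List Char) (k k' : Int) (hk' : 1 ≤ k') (hkk : k' ≤ k)
    (hL : 1 ≤ (Sl.length : Int)) :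
    ∀ (xs : List Char) (b b' v : Int), b ≤ b' →
      pvBwd (Sl.length : Int) (pvBuildB Sl) k xs b = some v →
        ∃ v', pvBwd (Sl.length : Int) (pvBuildB Sl) k' xs b' = some v' ∧ v ≤ v' := by
  intro xs
  induction xs with
  | nil =>
    intro b b' v hbb h
    simp only [pvBwd, Option.some.injEq] at h
    exact ⟨b', rfl, by omega⟩
  | cons ch rest ih =>
    intro b b' v hbb h
    simp only [pvBwd] at h ⊢
    rcases hgg : (pvBuildB Sl).get? ch with _ | occ
    · rw [hgg] at h; simp [pvBwd] at h
    · rw [hgg] at h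
      dsimp only at h ⊢
      by_cases h1 : occ.length = 0
      · simp [h1] at h
      · rw [if_neg h1] at h
        by_cases h2 : pvCntB (Sl.length : Int) occ b < k
        · simp [h2] at h
        · rw [if_neg h2] at h
          have hocc := pvBuildB_get? _ _ _ hgg
          have hgood : pvGood (Sl.length : Int) occ := by
            refine ⟨by rw [hocc]; exact pvOccs_sorted Sl ch, ?_, by simpa using h1, hL⟩
            intro x hx
            rw [hocc] at hx
            exact pvOccs_mem Sl ch x hx
          have hcm := pvCnt_mono _ _ hgood b b' hbb
          have h2' : ¬ (pvCntB (Sl.length : Int) occ b' < k') := by omega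
          rw [if_neg h1, if_neg h2']
          have hb1 : pvIdx (Sl.length : Int) occ (pvCntB (Sl.length : Int) occ b - k) ≤
              pvIdx (Sl.length : Int) occ (pvCntB (Sl.length : Int) occ b' - k') := by
            have := pvIdx_mono _ _ hgood (pvCntB (Sl.length : Int) occ b - k)
              (pvCntB (Sl.length : Int) occ b' - k') (by omega) (by omega)
            omega
          exact ih _ _ _ hb1 h

-- A's boundary test in pointer form
theorem pvBound (N L n i : Int) (hL : 1 ≤ L) (h0 : 0 ≤ i) (h1 : i ≤ L) :
    ((n < N ∨ (n = N ∧ i = 0)) ↔ n * L + i ≤ L * N) := by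
  have hcomm : L * N = N * L := mul_comm L N
  constructor
  · rintro (hn | ⟨hn, hi0⟩)
    · nlinarith [mul_le_mul_of_nonneg_right (show n + 1 ≤ N by omega) (show (0:Int) ≤ L by omega)]
    · subst hn; subst hi0; linarith
  · intro hle
    by_contra hcon
    rcases (not_or.mp hcon) with ⟨hc1, hc2⟩
    have hc1' : N ≤ n := by omega
    rcases eq_or_lt_of_le hc1' with hn | hn
    · have hi0 : i ≠ 0 := fun hz => hc2 ⟨hn.symm, hz⟩
      have hi1 : 1 ≤ i := by omega
      rw [← hn] at hle
      linarith
    · nlinarith [mul_le_mul_of_nonneg_right (show N + 1 ≤ n by omega) (show (0:Int) ≤ L by omega)]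

-- THE WALK EQUIVALENCE: A's forward k-jump walk equals the backward bound walk
theorem pvWalkEq (N : Int) (Sl : List Char)
    (hS : ∀ c ∈ Sl, 97 ≤ c.toNat ∧ c.toNat ≤ 122) (hL : 1 ≤ (Sl.length : Int))
    (k : Int) (hk : 1 ≤ k) :
    ∀ (w : List Char), (∀ c ∈ w, 97 ≤ c.toNat ∧ c.toNat ≤ 122) →
      ∀ (n i : Int), 0 ≤ n → 0 ≤ i → i ≤ (Sl.length : Int) →
      pvFA N (pvBuildA (Sl.map pvCode)).1 (pvBuildA (Sl.map pvCode)).2 k (w.map pvCode) n i =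
        decide (∃ v, pvBwd (Sl.length : Int) (pvBuildB Sl) k w.reverse
            ((Sl.length : Int) * N) = some v ∧ n * (Sl.length : Int) + i ≤ v) := by
  intro w
  induction w with
  | nil =>
    intro _ n i hn hi0 hiL
    simp only [List.map_nil, pvFA, List.reverse_nil, pvBwd]
    have hb := pvBound N (Sl.length : Int) n i hL hi0 hiL
    have hex : (∃ v, (some ((Sl.length : Int) * N) : Option Int) = some v ∧
        n * (Sl.length : Int) + i ≤ v) ↔ n * (Sl.length : Int) + i ≤ (Sl.length : Int) * N := by
      constructor
      · rintro ⟨v, hv, hle⟩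
        cases hv
        exact hle
      · intro hle
        exact ⟨_, rfl, hle⟩
    have hlhs : (decide (n < N) || (decide (n = N) && decide (i = 0))) =
        decide (n < N ∨ (n = N ∧ i = 0)) := by
      by_cases h1 : n < N <;> by_cases h2 : n = N <;> by_cases h3 : i = 0 <;>
        simp [h1, h2, h3]
    rw [hlhs, decide_eq_decide, hex]
    exact hb
  | cons ch ts ih =>
    intro hw n i hn hi0 hiL
    have hch := hw ch (by simp)
    have hts : ∀ c ∈ ts, 97 ≤ c.toNat ∧ c.toNat ≤ 122 := fun c hc => hw c (by simp [hc])
    have ht0 : 0 ≤ pvCode ch := by unfold pvCode; omega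
    have ht26 : pvCode ch < 26 := by unfold pvCode; omega
    have hlSc : ∀ c ∈ Sl.map pvCode, 0 ≤ c ∧ c < 26 := by
      intro c hc
      obtain ⟨x, hx, rfl⟩ := List.mem_map.mp hc
      have := hS x hx
      unfold pvCode; omega
    obtain ⟨-, -, hinv⟩ := pvBuildA_inv (Sl.map pvCode) hlSc
    obtain ⟨hpos, hcnt⟩ := hinv (pvCode ch) ht0 ht26
    rw [pvOccs_map_code] at hpos
    have hp0 : 0 ≤ n * (Sl.length : Int) + i := by positivity
    simp only [List.map_cons, pvFA, List.reverse_cons]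
    rw [pvBwd_append]
    by_cases hmem : ch ∈ Sl
    · -- the character occurs in S: both sides take a real step
      have hocc_ne : pvOccs Sl ch ≠ [] := pvOccs_ne_nil _ _ hmem
      set occ := pvOccs Sl ch with hocc
      have hgood : pvGood (Sl.length : Int) occ :=
        ⟨by rw [hocc]; exact pvOccs_sorted Sl ch,
         fun x hx => pvOccs_mem Sl ch x (by rwa [← hocc]), hocc_ne, hL⟩
      have hneN : ¬ (occ.length = 0) := by simpa using hocc_ne
      have hc0 : ¬ ((occ.length : Int) = 0) := by exact_mod_cast hneN
      have hcpos : (0:Int) < (occ.length : Int) := by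
        have := List.length_pos_iff.mpr hocc_ne; exact_mod_cast this
      rw [hpos, hcnt, if_neg hc0]
      have hcL : PySem.List.pyGetD (pvCntF (Sl.map pvCode) (pvCode ch)) i 0 =
          ((occ.countP (fun x => decide (x < i)) : Nat) : Int) := by
        rw [hocc, pvOccs_countP_lt _ _ _ hi0]
        unfold pvCntF
        rw [PySem.List.pyGetD_eq_getElem _ _ hi0 (by simp; omega)]
        rw [List.getElem_map, List.getElem_range]
        rw [← List.map_take, pvCountP_map_code]
      rw [hcL]
      set cL : Int := ((occ.countP (fun x => decide (x < i)) : Nat) : Int) with hcLdef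
      have hcL0 : 0 ≤ cL := by rw [hcLdef]; positivity
      have hcLc : cL ≤ (occ.length : Int) := by
        have := List.countP_le_length (p := fun x => decide (x < i)) (l := occ)
        rw [hcLdef]; exact_mod_cast this
      have hcnt_state : pvCntB (Sl.length : Int) occ (n * (Sl.length : Int) + i) =
          n * (occ.length : Int) + cL := pvCnt_state _ _ hgood n i hi0 hiL
      have hmemstep : ∀ idx : Int, 0 ≤ idx → idx < (occ.length : Int) →
          0 ≤ PySem.List.pyGetD occ idx 0 ∧
            PySem.List.pyGetD occ idx 0 < (Sl.length : Int) := by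
        intro idx h0 h1
        have hmemo : PySem.List.pyGetD occ idx 0 ∈ occ :=
          PySem.List.pyGetD_mem occ 0 (by constructor <;> omega)
        exact hgood.2.1 _ hmemo
      -- common tail: once A's next state realises the forward jump, apply IH + adjunction
      have main : ∀ n' i', 0 ≤ n' → 0 ≤ i' → i' ≤ (Sl.length : Int) →
          n' * (Sl.length : Int) + i' =
            pvIdx (Sl.length : Int) occ
              (pvCntB (Sl.length : Int) occ (n * (Sl.length : Int) + i) + k - 1) + 1 →
          pvFA N (pvBuildA (Sl.map pvCode)).1 (pvBuildA (Sl.map pvCode)).2 k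
              (ts.map pvCode) n' i' =
            decide (∃ v, (pvBwd (Sl.length : Int) (pvBuildB Sl) k ts.reverse
                ((Sl.length : Int) * N)).bind
                (pvBwd (Sl.length : Int) (pvBuildB Sl) k [ch]) = some v ∧
              n * (Sl.length : Int) + i ≤ v) := by
        intro n' i' hn' hi0' hiL' hidx
        rw [ih hts n' i' hn' hi0' hiL']
        cases h1 : pvBwd (Sl.length : Int) (pvBuildB Sl) k ts.reverse
            ((Sl.length : Int) * N) with
        | none => simp
        | some v1 =>
          simp only [Option.bind_some]
          have hget : (pvBuildB Sl).get? ch = some occ := by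
            rw [hocc]; exact pvBuildB_get?_some Sl ch hmem
          have hiff : (n' * (Sl.length : Int) + i' ≤ v1) ↔
              (∃ v, pvBwd (Sl.length : Int) (pvBuildB Sl) k [ch] v1 = some v ∧
                n * (Sl.length : Int) + i ≤ v) := by
            rw [hidx, pvAdj _ _ hgood k (n * (Sl.length : Int) + i) v1 hk hp0]
            constructor
            · rintro ⟨hkc, hpc⟩
              refine ⟨_, ?_, hpc⟩
              simp only [pvBwd, hget]
              rw [if_neg hneN, if_neg (by omega)]
            · rintro ⟨v, hv, hpv⟩
              simp only [pvBwd, hget] at hv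
              rw [if_neg hneN] at hv
              by_cases hcc : pvCntB (Sl.length : Int) occ v1 < k
              · rw [if_pos hcc] at hv; cases hv
              · rw [if_neg hcc] at hv
                cases hv
                exact ⟨by omega, hpv⟩
          rw [decide_eq_decide]
          simpa using hiff
      by_cases hbr : k ≤ (occ.length : Int) - cL
      · rw [if_pos hbr]
        have he1 : 0 ≤ cL + k - 1 := by omega
        have he2 : cL + k - 1 < (occ.length : Int) := by omega
        have hq := pvQR n ((occ.length : Int)) (cL + k - 1) he1 he2
        obtain ⟨ho0, hoL⟩ := hmemstep (cL + k - 1) he1 he2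
        apply main n (PySem.List.pyGetD occ (cL + k - 1) 0 + 1) hn (by omega) (by omega)
        unfold pvIdx
        rw [hcnt_state, show n * (occ.length : Int) + cL + k - 1 =
          n * (occ.length : Int) + (cL + k - 1) by ring, hq.1, hq.2]
        ring
      · rw [if_neg hbr]
        have hkk1 : 1 ≤ k - ((occ.length : Int) - cL) := by omega
        have hm0 := PySem.Int.mod_nonneg (k - ((occ.length : Int) - cL) - 1) hcpos
        have hm1 := PySem.Int.mod_lt (k - ((occ.length : Int) - cL) - 1) hcpos
        have hd0 := pvFdiv_nonneg (k - ((occ.length : Int) - cL) - 1) _ (by omega) hcpos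
        obtain ⟨ho0, hoL⟩ := hmemstep _ hm0 hm1
        have hsh := pvShift (n + 1) ((occ.length : Int))
          (k - ((occ.length : Int) - cL) - 1) hcpos
        apply main (n + 1 + PySem.Int.floordiv (k - ((occ.length : Int) - cL) - 1)
            ((occ.length : Int)))
          (PySem.List.pyGetD occ
            (PySem.Int.mod (k - ((occ.length : Int) - cL) - 1) ((occ.length : Int))) 0 + 1)
          (by omega) (by omega) (by omega)
        unfold pvIdx
        rw [hcnt_state, show n * (occ.length : Int) + cL + k - 1 =
          (n + 1) * (occ.length : Int) + (k - ((occ.length : Int) - cL) - 1) by ring,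
          hsh.1, hsh.2]
        ring
    · -- the character never occurs: both sides return False
      have hocc0 : pvOccs Sl ch = [] := pvOccs_not_mem _ _ hmem
      rw [hpos, hocc0]
      rw [if_pos (by simp)]
      cases h1 : pvBwd (Sl.length : Int) (pvBuildB Sl) k ts.reverse
          ((Sl.length : Int) * N) with
      | none => simp [h1]
      | some v1 =>
        simp [h1, pvBwd, (pvBuildB_get?_none Sl ch).mpr hmem]

-- the two feasibility tests agree for every k ≥ 1
theorem pvTestEq (N : Int) (Sl Tl : List Char)
    (hS : ∀ c ∈ Sl, 97 ≤ c.toNat ∧ c.toNat ≤ 122)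
    (hT : ∀ c ∈ Tl, 97 ≤ c.toNat ∧ c.toNat ≤ 122)
    (hTne : Tl ≠ []) (hL : 1 ≤ (Sl.length : Int)) (k : Int) (hk : 1 ≤ k) :
    pvFA N (pvBuildA (Sl.map pvCode)).1 (pvBuildA (Sl.map pvCode)).2 k (Tl.map pvCode) 0 0 =
      pvOKB (Sl.length : Int) (pvBuildB Sl) k Tl.reverse ((Sl.length : Int) * N) := by
  rw [pvWalkEq N Sl hS hL k hk Tl hT 0 0 le_rfl le_rfl (by omega)]
  rw [pvOKB_eq]
  cases hbw : pvBwd (Sl.length : Int) (pvBuildB Sl) k Tl.reverse ((Sl.length : Int) * N) with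
  | none => simp [hbw]
  | some v =>
    have hv0 : 0 ≤ v :=
      (pvBwd_le Sl k hk hL Tl.reverse _ _ hbw).2 (by simpa using hTne)
    simp [hbw, hv0]

-- B's test is false at and above hi = L*N // |T| + 1
theorem pvTestBig (N : Int) (Sl Tl : List Char) (hTne : Tl ≠ []) (hL : 1 ≤ (Sl.length : Int))
    (k : Int) (hk1 : 1 ≤ k)
    (hk : PySem.Int.floordiv ((Sl.length : Int) * N) ((Tl.length : Int)) + 1 ≤ k) :
    pvOKB (Sl.length : Int) (pvBuildB Sl) k Tl.reverse ((Sl.length : Int) * N) = false := by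
  have hm : (0:Int) < (Tl.length : Int) := by
    have := List.length_pos_iff.mpr hTne; exact_mod_cast this
  rw [pvOKB_eq]
  cases hbw : pvBwd (Sl.length : Int) (pvBuildB Sl) k Tl.reverse ((Sl.length : Int) * N) with
  | none => rfl
  | some v =>
    exfalso
    obtain ⟨hle, hnn⟩ := pvBwd_le Sl k hk1 hL Tl.reverse _ _ hbw
    have hv0 : 0 ≤ v := hnn (by simpa using hTne)
    rw [List.length_reverse] at hle
    have hkm : k * (Tl.length : Int) ≤ (Sl.length : Int) * N := by omega
    have := (PySem.Int.le_floordiv_iff_mul_le (a := (Sl.length : Int) * N)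
      (b := (Tl.length : Int)) (q := k) hm).mpr hkm
    omega

-- B's test is antitone in k
theorem pvTestMono (N : Int) (Sl Tl : List Char) (hL : 1 ≤ (Sl.length : Int))
    (k k' : Int) (hk' : 1 ≤ k') (hkk : k' ≤ k)
    (h : pvOKB (Sl.length : Int) (pvBuildB Sl) k Tl.reverse ((Sl.length : Int) * N) = true) :
    pvOKB (Sl.length : Int) (pvBuildB Sl) k' Tl.reverse ((Sl.length : Int) * N) = true := by
  rw [pvOKB_eq] at h ⊢
  cases hbw : pvBwd (Sl.length : Int) (pvBuildB Sl) k Tl.reverse ((Sl.length : Int) * N) with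
  | none => rw [hbw] at h; simp at h
  | some v =>
    obtain ⟨v', hv', -⟩ := pvBwd_mono Sl k k' hk' hkk hL Tl.reverse _ _ v le_rfl hbw
    rw [hv']
    rfl

-- ---------- the two searches ----------

theorem pvLoopA_char (f : Int → Bool) :
    ∀ (m : Nat) (ok ng : Int), (ng - ok).toNat = m → 0 ≤ ok → ok < ng →
      (ok = 0 ∨ f ok = true) → f ng = false →
      (pvLoopA f ok ng = 0 ∨ f (pvLoopA f ok ng) = true) ∧
        f (pvLoopA f ok ng + 1) = false ∧ 0 ≤ pvLoopA f ok ng := by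
  intro m
  induction m using Nat.strong_induction_on with
  | _ m ih =>
    intro ok ng hm h0 hlt hgood hng
    rw [pvLoopA]
    by_cases h : 1 < ng - ok
    · rw [dif_pos h]
      have hmid := pvMidLt ok ng h
      dsimp only
      by_cases hf : f (PySem.Int.floordiv (ng + ok) 2) = true
      · rw [if_pos hf]
        exact ih ((ng - PySem.Int.floordiv (ng + ok) 2)).toNat (by omega) _ ng rfl
          (by omega) (by omega) (Or.inr hf) hng
      · rw [if_neg (by simpa using hf)]
        exact ih ((PySem.Int.floordiv (ng + ok) 2 - ok)).toNat (by omega) ok _ rfl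
          h0 (by omega) hgood (by simpa using hf)
    · rw [dif_neg h]
      have hng1 : ng = ok + 1 := by omega
      exact ⟨hgood, by rw [← hng1]; exact hng, h0⟩

theorem pvHalfPow (w : Nat) : PySem.Int.floordiv ((2:Int) ^ (w + 1)) 2 = 2 ^ w := by
  rw [PySem.Int.floordiv_eq_ediv_of_pos (by norm_num), pow_succ]
  exact Int.mul_ediv_cancel _ (by norm_num)

theorem pvBitLoop_char (f : Int → Bool) (hi : Int)
    (hbig : ∀ j, 1 ≤ j → hi ≤ j → f j = false) :
    ∀ (w : Nat) (ans : Int), 0 ≤ ans → (ans = 0 ∨ f ans = true) →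
      f (ans + 2 * 2 ^ w) = false →
      (pvBitLoop f hi ans (2 ^ w) = 0 ∨ f (pvBitLoop f hi ans (2 ^ w)) = true) ∧
        f (pvBitLoop f hi ans (2 ^ w) + 1) = false ∧ 0 ≤ pvBitLoop f hi ans (2 ^ w) := by
  intro w
  induction w with
  | zero =>
    intro ans h0 hgood hinv
    rw [pvBitLoop, dif_pos (by norm_num : (1:Int) ≤ 2 ^ 0)]
    dsimp only
    norm_num at hinv ⊢
    by_cases hlt : ans + 1 < hi
    · by_cases hf : f (ans + 1) = true
      · rw [if_pos (by simp [hlt, hf])]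
        rw [pvBitLoop, dif_neg (by norm_num)]
        exact ⟨Or.inr hf, by rw [show ans + 1 + 1 = ans + 2 by ring]; exact hinv, by omega⟩
      · rw [if_neg (by simp [hf])]
        rw [pvBitLoop, dif_neg (by norm_num)]
        exact ⟨hgood, by simpa using hf, h0⟩
    · rw [if_neg (by simp [hlt])]
      rw [pvBitLoop, dif_neg (by norm_num)]
      exact ⟨hgood, hbig (ans + 1) (by omega) (by omega), h0⟩
  | succ w ihw =>
    intro ans h0 hgood hinv
    have hp : (0:Int) < 2 ^ (w + 1) := by positivity
    have hpe : (2:Int) * 2 ^ w = 2 ^ (w + 1) := by rw [pow_succ]; ring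
    rw [pvBitLoop, dif_pos (by omega), pvHalfPow w]
    dsimp only
    by_cases hlt : ans + 2 ^ (w + 1) < hi
    · by_cases hf : f (ans + 2 ^ (w + 1)) = true
      · rw [if_pos (by simp [hlt, hf])]
        refine ihw (ans + 2 ^ (w + 1)) (by omega) (Or.inr hf) ?_
        rw [hpe, show ans + 2 ^ (w + 1) + 2 ^ (w + 1) = ans + 2 * 2 ^ (w + 1) by ring]
        exact hinv
      · rw [if_neg (by simp [hf])]
        refine ihw ans h0 hgood ?_
        rw [hpe]
        simpa using hf
    · rw [if_neg (by simp [hlt])]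
      refine ihw ans h0 hgood ?_
      rw [hpe]
      exact hbig _ (by omega) (by omega)

theorem pvBitLoop_zero (f : Int → Bool) (hi : Int) (hhi : hi ≤ 1) :
    ∀ (m : Nat) (step : Int), step.toNat = m → pvBitLoop f hi 0 step = 0 := by
  intro m
  induction m using Nat.strong_induction_on with
  | _ m ih =>
    intro step hm
    rw [pvBitLoop]
    by_cases h : 1 ≤ step
    · rw [dif_pos h]
      have hh := pvHalfLt step h
      dsimp only
      rw [if_neg (by simp; omega)]
      exact ih (PySem.Int.floordiv step 2).toNat (by omega) _ rfl
    · rw [dif_neg h]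

theorem pvInitStep_spec (hi : Int) :
    ∀ (m : Nat) (s : Int), (hi - s).toNat = m → 1 ≤ s → (∃ w : Nat, s = 2 ^ w) →
      (∃ w : Nat, pvInitStep hi s = 2 ^ w) ∧ 1 ≤ pvInitStep hi s ∧
        hi ≤ pvInitStep hi s := by
  intro m
  induction m using Nat.strong_induction_on with
  | _ m ih =>
    intro s hm hs hpow
    rw [pvInitStep]
    by_cases h : 1 ≤ s ∧ s < hi
    · rw [dif_pos h]
      obtain ⟨w, rfl⟩ := hpow
      exact ih (hi - 2 * 2 ^ w).toNat (by omega) _ rfl (by omega)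
        ⟨w + 1, by rw [pow_succ]; ring⟩
    · rw [dif_neg h]
      exact ⟨hpow, hs, by omega⟩

-- a result satisfying the max-characterisation is unique (given agreement and antitonicity)
theorem pvUnique (fA fB : Int → Bool)
    (hEq : ∀ j, 1 ≤ j → fA j = fB j)
    (hMono : ∀ a b, 1 ≤ a → a ≤ b → fB b = true → fB a = true)
    (r1 r2 : Int)
    (h1 : (r1 = 0 ∨ fA r1 = true) ∧ fA (r1 + 1) = false ∧ 0 ≤ r1)
    (h2 : (r2 = 0 ∨ fB r2 = true) ∧ fB (r2 + 1) = false ∧ 0 ≤ r2) : r1 = r2 := by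
  obtain ⟨hg1, hf1, h01⟩ := h1
  obtain ⟨hg2, hf2, h02⟩ := h2
  by_contra hne
  rcases lt_or_gt_of_ne hne with hlt | hlt
  · have hr2 : fB r2 = true := by
      rcases hg2 with h | h
      · omega
      · exact h
    have hup := hMono (r1 + 1) r2 (by omega) (by omega) hr2
    rw [← hEq (r1 + 1) (by omega)] at hup
    rw [hf1] at hup
    cases hup
  · have hr1 : fA r1 = true := by
      rcases hg1 with h | h
      · omega
      · exact h
    rw [hEq r1 (by omega)] at hr1
    have hup := hMono (r2 + 1) r1 (by omega) (by omega) hr1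
    rw [hf2] at hup
    cases hup

-- ===== VERDICT (by name: the statement is the Claim_ definition above) =====
theorem solve_spec : Claim_equal_solve := by
  intro N S T _hD hP
  obtain ⟨hT0, hSb, hOr⟩ := hP
  have hS : ∀ c ∈ S.toList, 97 ≤ c.toNat ∧ c.toNat ≤ 122 := by
    intro c hc
    have := List.all_eq_true.mp hSb c hc
    simp at this; omega
  have hTl : T.toList ≠ [] := fun hc => hT0 (String.toList_eq_nil_iff.mp hc)
  have hTlen : 1 ≤ (T.toList.length : Int) := by
    have := List.length_pos_iff.mpr hTl; exact_mod_cast this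
  unfold Spec_solve solve solve_alt
  simp only [PySem.Str.len_eq, List.length_map]
  set L : Int := (S.toList.length : Int) with hLdef
  set m : Int := (T.toList.length : Int) with hmdef
  have hL0 : 0 ≤ L := by rw [hLdef]; positivity
  set hi : Int := PySem.Int.floordiv (L * N) m + 1 with hhidef
  by_cases hhi : hi ≤ 1
  · rw [pvLoopA, dif_neg (by omega), pvBitLoop_zero _ _ hhi _ _ rfl]
  · have hi2 : 2 ≤ hi := by omega
    have hL1 : 1 ≤ L := by
      by_contra hc
      have hLz : L = 0 := by omega
      have : PySem.Int.floordiv (L * N) m = 0 := by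
        rw [hLz, zero_mul, PySem.Int.floordiv_eq_ediv_of_pos (by omega)]
        simp
      omega
    have hTlow : T.toList.all (fun c => 97 ≤ c.toNat && c.toNat ≤ 122) = true := by
      rcases hOr with h | h
      · exact h
      · exfalso
        have : PySem.Int.floordiv (L * N) m < 1 := by
          rw [PySem.Int.floordiv_lt_iff_lt_mul (by omega)]
          omega
        omega
    have hT : ∀ c ∈ T.toList, 97 ≤ c.toNat ∧ c.toNat ≤ 122 := by
      intro c hc
      have := List.all_eq_true.mp hTlow c hc
      simp at this; omega
    set fA : Int → Bool := fun j => pvFA N (pvBuildA (S.toList.map pvCode)).1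
      (pvBuildA (S.toList.map pvCode)).2 j (T.toList.map pvCode) 0 0 with hfA
    set fB : Int → Bool := fun j =>
      pvOKB L (pvBuildB S.toList) j T.toList.reverse (L * N) with hfB
    have hEq : ∀ j, 1 ≤ j → fA j = fB j := fun j hj =>
      pvTestEq N S.toList T.toList hS hT hTl hL1 j hj
    have hbig : ∀ j, 1 ≤ j → hi ≤ j → fB j = false := fun j h1 h2 =>
      pvTestBig N S.toList T.toList hTl hL1 j h1 (by omega)
    have hMono : ∀ a b, 1 ≤ a → a ≤ b → fB b = true → fB a = true := fun a b h1 h2 hb =>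
      pvTestMono N S.toList T.toList hL1 b a h1 h2 hb
    have hAbig : fA hi = false := by
      rw [hEq hi (by omega)]
      exact hbig hi (by omega) le_rfl
    have chA := pvLoopA_char fA (hi - 0).toNat 0 hi rfl le_rfl (by omega)
      (Or.inl rfl) hAbig
    obtain ⟨⟨w, hw⟩, hs1, hshi⟩ :=
      pvInitStep_spec hi (hi - 1).toNat 1 rfl le_rfl ⟨0, rfl⟩
    rw [hw]
    have hpw : (1:Int) ≤ 2 ^ w := by rw [← hw]; exact hs1
    have h2w : hi ≤ (2:Int) ^ w := hw ▸ hshi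
    have chB := pvBitLoop_char fB hi hbig w 0 le_rfl (Or.inl rfl)
      (hbig (0 + 2 * 2 ^ w) (by linarith) (by linarith))
    exact pvUnique fA fB hEq hMono _ _ chA chB
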